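-- pv_equiv track=rewrite | github.com/adx-coder/NUTRIRE | pipeline/src/scrapers/mocofood.py | _classify_comma_list
-- ===== SOURCE A (Python) =====
-- def _classify_comma_list(raw: str | None, mapping: dict[str, str]) -> list[str]:
--     """Split a comma-separated field and map each value via a lookup table."""
--     if not raw:
--         return []
--     out: list[str] = []
--     for part in raw.lower().split(","):
--         part = part.strip()
--         for key, val in mapping.items():
--             if key in part and val not in out:
--                 out.append(val)
--     return out
-- ===== SOURCE B (Python) =====
-- def _first_match(key, parts):
--     """Index of the first part containing key, or None."""
--     for j, part in enumerate(parts):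
--         if key in part:
--             return j
--     return None
--
--
-- def _classify_comma_list(raw, mapping):
--     """Split a comma-separated field and map each value via a lookup table."""
--     if not raw:
--         return []
--     parts = [p.strip() for p in raw.lower().split(",")]
--     hits = []
--     for i, (key, val) in enumerate(mapping.items()):
--         j = _first_match(key, parts)
--         if j is not None:
--             hits.append((j, i, val))
--     hits.sort(key=lambda t: (t[0], t[1]))
--     return list(dict.fromkeys(val for _, _, val in hits))
-- ===== Notes on version B (the rewrite author's own statement) =====
-- stated objective: alternative
-- what changed: Replaced the fused part-by-part scan with inline dedup by an index-and-sort algorithm: for each mapping entry find the index of its first matching part (with early exit), sort the hits by (part index, mapping index), then dedup the values in that order.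
import Mathlib
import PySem

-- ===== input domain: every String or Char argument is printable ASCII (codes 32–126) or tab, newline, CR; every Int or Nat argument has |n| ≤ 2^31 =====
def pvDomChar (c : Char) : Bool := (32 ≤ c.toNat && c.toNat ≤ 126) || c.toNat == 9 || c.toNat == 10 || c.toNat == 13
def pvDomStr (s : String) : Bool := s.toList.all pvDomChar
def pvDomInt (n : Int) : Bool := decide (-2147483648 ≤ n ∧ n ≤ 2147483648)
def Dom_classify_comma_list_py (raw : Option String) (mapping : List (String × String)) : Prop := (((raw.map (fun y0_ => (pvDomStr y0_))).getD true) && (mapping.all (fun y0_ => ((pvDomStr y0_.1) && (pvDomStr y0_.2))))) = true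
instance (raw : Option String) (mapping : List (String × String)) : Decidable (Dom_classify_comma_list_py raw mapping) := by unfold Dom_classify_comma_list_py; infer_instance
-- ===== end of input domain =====

-- B replaces A's fused scan-and-inline-dedup loop by an index-and-sort algorithm:
-- first matching part index per mapping entry, sort hits by (part index, entry index), then dedup. Alternative, same cost.

-- ===== PORT A =====
-- literal port of A: one fused loop over parts and mapping entries, appending val only when not already present
def classify_comma_list_py (raw : Option String) (mapping : List (String × String)) : List String :=
  match raw with
  | none => []
  | some s =>
    if s = "" then []
    else
      (((PySem.Str.split? (PySem.Str.lower s) ",").getD []).foldl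
        (fun out part0 =>
          let part := PySem.Str.strip part0
          mapping.foldl
            (fun out kv =>
              if PySem.Str.isIn kv.1 part && !(out.contains kv.2) then out ++ [kv.2] else out)
            out)
        [])

-- ===== PORT B =====
-- helper _first_match: index of the first part containing key, or None (loop with early return)
def pvFirstMatch (key : String) : List (Int × String) → Option Int
  | [] => none
  | (j, part) :: rest => if PySem.Str.isIn key part then some j else pvFirstMatch key rest

-- literal port of B: strip parts, collect (first-part-index, entry-index, val) hits, sort by (j, i), dedup vals
def classify_comma_list_py_alt (raw : Option String) (mapping : List (String × String)) : List String :=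
  match raw with
  | none => []
  | some s =>
    if s = "" then []
    else
      let parts := ((PySem.Str.split? (PySem.Str.lower s) ",").getD []).map PySem.Str.strip
      let hits := (PySem.List.enumerate mapping).foldl
        (fun acc ikv =>
          match pvFirstMatch ikv.2.1 (PySem.List.enumerate parts) with
          | some j => acc ++ [(j, ikv.1, ikv.2.2)]
          | none => acc) []
      let sortedHits := PySem.List.sorted2 hits (fun t => t.1) (fun t => t.2.1)
      PySem.List.dedup (sortedHits.map (fun t => t.2.2))

-- ===== PRECONDITION & SPEC =====
def Spec_classify_comma_list_py (raw : Option String) (mapping : List (String × String)) (out : List String) : Prop := out = classify_comma_list_py_alt raw mapping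
instance (raw : Option String) (mapping : List (String × String)) (out : List String) : Decidable (Spec_classify_comma_list_py raw mapping out) := by unfold Spec_classify_comma_list_py; infer_instance

-- ===== CLAIM (what is proved, stated in full; the proofs are below) =====
def Claim_equal_classify_comma_list_py : Prop := ∀ (raw : Option String) (mapping : List (String × String)), Dom_classify_comma_list_py raw mapping → Spec_classify_comma_list_py raw mapping (classify_comma_list_py raw mapping)

-- ===== LEMMAS AND PROOFS =====

-- the matched values of one part, in mapping order
def pvG (mapping : List (String × String)) (part : String) : List String :=
  (mapping.filter (fun kv => PySem.Str.isIn kv.1 part)).map (·.2)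

-- the values whose entry's FIRST matching part (w.r.t. the indexed part list ep) has index k
def pvTG (mapping : List (String × String)) (ep : List (Int × String)) (k : Int) : List String :=
  mapping.filterMap (fun kv => if pvFirstMatch kv.1 ep = some k then some kv.2 else none)

-- A's inner loop over the mapping is Set.update with the matched values of this part
theorem inner_loop_eq_update (mapping : List (String × String)) (part : String)
    (out : List String) :
    mapping.foldl
      (fun out kv =>
        if PySem.Str.isIn kv.1 part && !(out.contains kv.2) then out ++ [kv.2] else out)
      out
    = PySem.Set.update out (pvG mapping part) := by
  induction mapping generalizing out with
  | nil => rfl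
  | cons kv rest ih =>
    simp only [List.foldl_cons, pvG, List.filter_cons]
    by_cases h : PySem.Str.isIn kv.1 part = true
    · have h' : PySem.Chars.isIn kv.1.toList part.toList = true := by simpa using h
      have e : (if (PySem.Str.isIn kv.1 part && !(out.contains kv.2)) = true then out ++ [kv.2] else out)
          = PySem.Set.add out kv.2 := by
        by_cases hc : kv.2 ∈ out <;> simp [PySem.Set.add, PySem.Set.contains, h', hc]
      rw [if_pos h, List.map_cons, e, ih]
      rfl
    · have e : (if (PySem.Str.isIn kv.1 part && !(out.contains kv.2)) = true then out ++ [kv.2] else out)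
          = out := by
        have h' : ¬ PySem.Chars.isIn kv.1.toList part.toList = true := by simpa using h
        simp [h']
      rw [if_neg h, e, ih, pvG]

-- folding Set.update over a list of chunks is Set.update with their concatenation
theorem foldl_update_eq_update_flatMap {A B : Type} [BEq B]
    (l : List A) (g : A → List B) (s : List B) :
    l.foldl (fun s a => PySem.Set.update s (g a)) s
    = PySem.Set.update s (l.flatMap g) := by
  induction l generalizing s with
  | nil => rfl
  | cons a rest ih =>
    simp only [List.foldl_cons, List.flatMap_cons, ih]
    simp [PySem.Set.update, List.foldl_append]

theorem mem_update_left {s : PySem.Set String} {l : List String} {x : String}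
    (h : x ∈ s) : x ∈ PySem.Set.update s l := by
  induction l generalizing s with
  | nil => exact h
  | cons x t ih =>
    simp only [PySem.Set.update, List.foldl_cons]
    exact ih ((PySem.Set.mem_add s x _).mpr (Or.inl h))

theorem mem_update_right {s : PySem.Set String} {l : List String} {x : String}
    (h : x ∈ l) : x ∈ PySem.Set.update s l := by
  induction l generalizing s with
  | nil => cases h
  | cons x t ih =>
    simp only [PySem.Set.update, List.foldl_cons]
    rcases List.mem_cons.mp h with rfl | hx
    · exact mem_update_left ((PySem.Set.mem_add s _ _).mpr (Or.inr rfl))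
    · exact ih hx

-- B's hit-collecting loop is a filterMap
theorem foldl_match_append (l : List (Int × String × String))
    (h : Int × String × String → Option Int) (mk : Int × String × String → Int → Int × Int × String)
    (acc : List (Int × Int × String)) :
    l.foldl (fun acc x => match h x with
      | some j => acc ++ [mk x j]
      | none => acc) acc
    = acc ++ l.filterMap (fun x => (h x).map (mk x)) := by
  induction l generalizing acc with
  | nil => simp
  | cons x t ih =>
    simp only [List.foldl_cons, List.filterMap_cons]
    cases hx : h x with
    | none => simp [ih]
    | some j => simp [ih]

-- pvFirstMatch over an appended list: first hit in the left part wins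
theorem pvFirstMatch_append (key : String) (l1 l2 : List (Int × String)) :
    pvFirstMatch key (l1 ++ l2) = (pvFirstMatch key l1).or (pvFirstMatch key l2) := by
  induction l1 with
  | nil => simp [pvFirstMatch]
  | cons jp t ih =>
    obtain ⟨j, p⟩ := jp
    by_cases h : PySem.Chars.isIn key.toList p.toList = true <;>
      simp [pvFirstMatch, PySem.Str.isIn, h, ih]

-- pvFirstMatch over an enumeration returns an index in range
theorem pvFirstMatch_bounds (key : String) (xs : List String) (s j : Int)
    (h : pvFirstMatch key (PySem.List.enumerate xs s) = some j) :
    s ≤ j ∧ j < s + xs.length := by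
  induction xs generalizing s with
  | nil => simp [PySem.List.enumerate, pvFirstMatch] at h
  | cons x t ih =>
    rw [PySem.List.enumerate_cons] at h
    by_cases hx : PySem.Chars.isIn key.toList x.toList = true
    · simp [pvFirstMatch, PySem.Str.isIn, hx] at h
      subst h
      simp only [List.length_cons]
      push_cast
      omega
    · simp only [pvFirstMatch, PySem.Str.isIn, hx] at h
      have := ih (s + 1) h
      simp
      omega

theorem pvFirstMatch_mem_fst (key : String) (l : List (Int × String)) (j : Int)
    (h : pvFirstMatch key l = some j) : j ∈ l.map (·.1) := by
  induction l with
  | nil => simp [pvFirstMatch] at h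
  | cons jp t ih =>
    obtain ⟨j1, p⟩ := jp
    by_cases hx : PySem.Chars.isIn key.toList p.toList = true
    · simp [pvFirstMatch, PySem.Str.isIn, hx] at h
      simp [h]
    · simp only [pvFirstMatch, PySem.Str.isIn, hx] at h
      simp [ih h]

-- one part: adding its matched values to s equals adding its first-matched-here values,
-- provided values matched here but first matched elsewhere are already in s
theorem step_update (mapping : List (String × String)) (ep : List (Int × String))
    (p : String) (k : Int) (s : PySem.Set String)
    (H1 : ∀ kv ∈ mapping, PySem.Str.isIn kv.1 p = true → ¬ pvFirstMatch kv.1 ep = some k → kv.2 ∈ s)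
    (H2 : ∀ kv ∈ mapping, pvFirstMatch kv.1 ep = some k → PySem.Str.isIn kv.1 p = true) :
    PySem.Set.update s (pvG mapping p) = PySem.Set.update s (pvTG mapping ep k) := by
  induction mapping generalizing s with
  | nil => rfl
  | cons kv rest ih =>
    have H1' := fun kv' h => H1 kv' (List.mem_cons_of_mem _ h)
    have H2' := fun kv' h => H2 kv' (List.mem_cons_of_mem _ h)
    simp only [pvG, pvTG, List.filter_cons, List.filterMap_cons]
    by_cases hIn : PySem.Str.isIn kv.1 p = true
    · by_cases hF : pvFirstMatch kv.1 ep = some k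
      · rw [if_pos hIn, if_pos hF, List.map_cons]
        show PySem.Set.update s (kv.2 :: _) = PySem.Set.update s (kv.2 :: _)
        simp only [PySem.Set.update, List.foldl_cons]
        exact ih (PySem.Set.add s kv.2)
          (fun kv' h hin hf => (PySem.Set.mem_add s kv.2 kv'.2).mpr (Or.inl (H1' kv' h hin hf)))
          H2'
      · have hs : kv.2 ∈ s := H1 kv (List.mem_cons_self ..) hIn hF
        rw [if_pos hIn, if_neg hF, List.map_cons]
        show PySem.Set.update s (kv.2 :: _) = _
        simp only [PySem.Set.update, List.foldl_cons, PySem.Set.add_of_mem hs]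
        exact ih s H1' H2'
    · have hF : ¬ pvFirstMatch kv.1 ep = some k := fun hf => hIn (H2 kv (List.mem_cons_self ..) hf)
      rw [if_neg hIn, if_neg hF]
      exact ih s H1' H2'

-- main induction over the parts: all matched values vs. first-match-grouped values
theorem main_update (mapping : List (String × String)) (parts : List String) :
    ∀ (ps pre : List String) (s : PySem.Set String), parts = pre ++ ps →
    (∀ kv ∈ mapping, ∀ j : Int, pvFirstMatch kv.1 (PySem.List.enumerate parts) = some j →
        j < (pre.length : Int) → kv.2 ∈ s) →
    PySem.Set.update s ((PySem.List.enumerate ps (pre.length : Int)).flatMap (fun jp => pvG mapping jp.2))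
      = PySem.Set.update s ((PySem.List.enumerate ps (pre.length : Int)).flatMap
          (fun jp => pvTG mapping (PySem.List.enumerate parts) jp.1)) := by
  intro ps
  induction ps with
  | nil => intro pre s _ _; rfl
  | cons p ps' ih =>
    intro pre s hsplit Hs
    have hupdApp : ∀ (s : PySem.Set String) (a b : List String),
        PySem.Set.update s (a ++ b) = PySem.Set.update (PySem.Set.update s a) b := by
      intro s a b; simp [PySem.Set.update, List.foldl_append]
    have hep : PySem.List.enumerate parts
        = PySem.List.enumerate pre 0
          ++ ((pre.length : Int), p) :: PySem.List.enumerate ps' ((pre.length : Int) + 1) := by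
      rw [hsplit, PySem.List.enumerate_append, PySem.List.enumerate_cons]
      norm_num
    have H2 : ∀ kv ∈ mapping, pvFirstMatch kv.1 (PySem.List.enumerate parts) = some (pre.length : Int) →
        PySem.Str.isIn kv.1 p = true := by
      intro kv _ hf
      rw [hep, pvFirstMatch_append] at hf
      cases hpre : pvFirstMatch kv.1 (PySem.List.enumerate pre 0) with
      | some j =>
        rw [hpre] at hf
        have hb := pvFirstMatch_bounds kv.1 pre 0 j hpre
        simp at hf
        omega
      | none =>
        rw [hpre, Option.none_or] at hf
        by_cases hin : PySem.Chars.isIn kv.1.toList p.toList = true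
        · simpa [PySem.Str.isIn] using hin
        · simp only [pvFirstMatch, PySem.Str.isIn, hin] at hf
          have hb := pvFirstMatch_bounds kv.1 ps' ((pre.length : Int) + 1) _ hf
          omega
    have H1 : ∀ kv ∈ mapping, PySem.Str.isIn kv.1 p = true →
        ¬ pvFirstMatch kv.1 (PySem.List.enumerate parts) = some (pre.length : Int) → kv.2 ∈ s := by
      intro kv hm hin hf
      cases hpre : pvFirstMatch kv.1 (PySem.List.enumerate pre 0) with
      | some j =>
        have hb := pvFirstMatch_bounds kv.1 pre 0 j hpre
        refine Hs kv hm j ?_ (by omega)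
        rw [hep, pvFirstMatch_append, hpre]
        rfl
      | none =>
        exfalso
        apply hf
        rw [hep, pvFirstMatch_append, hpre, Option.none_or]
        have hin' : PySem.Chars.isIn kv.1.toList p.toList = true := by simpa [PySem.Str.isIn] using hin
        simp [pvFirstMatch, PySem.Str.isIn, hin']
    have hstep := step_update mapping (PySem.List.enumerate parts) p (pre.length : Int) s H1 H2
    rw [PySem.List.enumerate_cons, List.flatMap_cons, List.flatMap_cons, hupdApp, hupdApp, hstep]
    have hlen : (((pre ++ [p]).length : Nat) : Int) = (pre.length : Int) + 1 := by simp
    have ih' := ih (pre ++ [p]) (PySem.Set.update s (pvTG mapping (PySem.List.enumerate parts) (pre.length : Int)))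
      (by rw [hsplit, List.append_assoc]; rfl)
      (by
        intro kv hm j hf hj
        rw [hlen] at hj
        by_cases hjk : j < (pre.length : Int)
        · exact mem_update_left (Hs kv hm j hf hjk)
        · have hjeq : j = (pre.length : Int) := by omega
          subst hjeq
          exact mem_update_right (List.mem_filterMap.mpr ⟨kv, hm, by rw [if_pos hf]⟩))
    rw [hlen] at ih'
    exact ih'

-- sorted2 with two Int keys is sorted with the lexicographic key
theorem sorted2_eq_sorted_lex {A : Type} (xs : List A) (k1 k2 : A → Int) :
    PySem.List.sorted2 xs k1 k2 = PySem.List.sorted xs (fun x => toLex (k1 x, k2 x)) := by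
  rw [PySem.List.sorted_eq_foldl_insertBy]
  unfold PySem.List.sorted2
  show List.foldl (fun acc x => PySem.List.insertBy
      (fun a b => decide (k1 a < k1 b) || (!decide (k1 b < k1 a) && decide (k2 a < k2 b))) x acc) [] xs
    = _
  congr 1
  funext acc x
  congr 1
  funext a b
  rw [Bool.eq_iff_iff]
  simp only [Bool.or_eq_true, Bool.and_eq_true, Bool.not_eq_true', decide_eq_true_eq,
    decide_eq_false_iff_not, Prod.Lex.toLex_lt_toLex]
  constructor
  · rintro (h | ⟨h1, h2⟩)
    · exact Or.inl h
    · by_cases he : k1 a = k1 b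
      · exact Or.inr ⟨he, h2⟩
      · exact Or.inl (by omega)
  · rintro (h | ⟨h1, h2⟩)
    · exact Or.inl h
    · exact Or.inr ⟨by omega, h2⟩

-- a flatMap of an "emit at index j" option over a nodup-indexed list is the single emission
theorem flatMap_if_eq_index {G : Type} (l : List (Int × String)) (o : Option Int) (mk : Int → G)
    (hn : (l.map (·.1)).Nodup) (hmem : ∀ j, o = some j → j ∈ l.map (·.1)) :
    l.flatMap (fun jp => (if o = some jp.1 then some (mk jp.1) else none).toList)
      = (o.map mk).toList := by
  cases o with
  | none => simp
  | some j =>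
    induction l with
    | nil => simpa using hmem j rfl
    | cons jp t ih =>
      obtain ⟨j1, q⟩ := jp
      simp only [List.flatMap_cons]
      by_cases he : j = j1
      · subst he
        rw [List.map_cons] at hn
        simp
        intro a b hab hc
        exact (List.nodup_cons.mp hn).1 (List.mem_map.mpr ⟨(a, b), hab, by simp [hc]⟩)
      · have hmem' : ∀ j', some j = some j' → j' ∈ t.map (·.1) := by
          intro j' hj'
          cases hj'
          have := hmem j rfl
          simp only [List.map_cons, List.mem_cons] at this
          tauto
        have hn' : (t.map (·.1)).Nodup := by
          rw [List.map_cons] at hn; exact (List.nodup_cons.mp hn).2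
        have hne : ¬ (some j = some (j1 : Int)) := by simpa using he
        rw [if_neg hne]
        simpa using ih hn' hmem'

theorem pairwise_flatMap {A B : Type} {R : B → B → Prop} (l : List A) (f : A → List B)
    (h1 : ∀ a ∈ l, (f a).Pairwise R)
    (h2 : l.Pairwise (fun a b => ∀ x ∈ f a, ∀ y ∈ f b, R x y)) :
    (l.flatMap f).Pairwise R := by
  induction l with
  | nil => simp
  | cons a t ih =>
    simp only [List.flatMap_cons]
    rw [List.pairwise_append]
    refine ⟨h1 a (by simp), ih (fun b hb => h1 b (by simp [hb])) (List.Pairwise.sublist (by simp) h2), ?_⟩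
    intro x hx y hy
    obtain ⟨b, hb, hyb⟩ := List.mem_flatMap.mp hy
    exact (List.pairwise_cons.mp h2).1 b hb x hx y hyb

-- the part-major list of first-match triples
def pvTtrip (mapping : List (String × String)) (ep : List (Int × String)) : List (Int × Int × String) :=
  ep.flatMap (fun jp => (PySem.List.enumerate mapping).filterMap
    (fun ikv => if pvFirstMatch ikv.2.1 ep = some jp.1 then some (jp.1, ikv.1, ikv.2.2) else none))

-- sorting B's hits by (part index, entry index) yields the part-major triple list
theorem sorted_hits_eq_ttrip (mapping : List (String × String)) (parts : List String) :
    PySem.List.sorted2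
      ((PySem.List.enumerate mapping).filterMap
        (fun ikv => (pvFirstMatch ikv.2.1 (PySem.List.enumerate parts)).map
          (fun j => (j, ikv.1, ikv.2.2))))
      (fun t => t.1) (fun t => t.2.1)
    = pvTtrip mapping (PySem.List.enumerate parts) := by
  have hnodup : ((PySem.List.enumerate parts).map (·.1)).Nodup := by
    rw [PySem.List.map_fst_enumerate]
    exact PySem.List.nodup_pyRange_one _ _
  rw [sorted2_eq_sorted_lex]
  apply PySem.List.sorted_eq_of_perm_of_pairwise_lt
  · -- permutation: swap the two flatMaps at the multiset level
    rw [← Multiset.coe_eq_coe]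
    unfold pvTtrip
    simp only [List.filterMap_eq_flatMap_toList, ← Multiset.coe_bind]
    rw [Multiset.bind_bind]
    apply Multiset.bind_congr
    intro ikv _
    rw [Multiset.coe_bind]
    exact congrArg _ (flatMap_if_eq_index (PySem.List.enumerate parts)
      (pvFirstMatch ikv.2.1 (PySem.List.enumerate parts)) (fun j => (j, ikv.1, ikv.2.2))
      hnodup (fun j hj => pvFirstMatch_mem_fst _ _ _ hj))
  · -- pairwise strictly increasing in the lexicographic key
    apply pairwise_flatMap
    · intro jp _
      rw [List.pairwise_filterMap]
      apply (PySem.List.pairwise_lt_enumerate mapping 0).imp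
      intro a a' hlt b hb b' hb'
      by_cases ha : pvFirstMatch a.2.1 (PySem.List.enumerate parts) = some jp.1
      · by_cases ha' : pvFirstMatch a'.2.1 (PySem.List.enumerate parts) = some jp.1
        · rw [if_pos ha] at hb; rw [if_pos ha'] at hb'
          cases hb; cases hb'
          exact Prod.Lex.toLex_lt_toLex.mpr (Or.inr ⟨rfl, hlt⟩)
        · rw [if_neg ha'] at hb'; cases hb'
      · rw [if_neg ha] at hb; cases hb
    · apply (PySem.List.pairwise_lt_enumerate parts 0).imp
      intro jp jq hlt x hx y hy
      obtain ⟨a, _, hax⟩ := List.mem_filterMap.mp hx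
      obtain ⟨b, _, hby⟩ := List.mem_filterMap.mp hy
      have hx1 : x.1 = jp.1 := by
        by_cases h : pvFirstMatch a.2.1 (PySem.List.enumerate parts) = some jp.1
        · rw [if_pos h] at hax; cases hax; rfl
        · rw [if_neg h] at hax; cases hax
      have hy1 : y.1 = jq.1 := by
        by_cases h : pvFirstMatch b.2.1 (PySem.List.enumerate parts) = some jq.1
        · rw [if_pos h] at hby; cases hby; rfl
        · rw [if_neg h] at hby; cases hby
      exact Prod.Lex.toLex_lt_toLex.mpr (Or.inl (by rw [hx1, hy1]; exact hlt))

theorem ttrip_vals (mapping : List (String × String)) (parts : List String) :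
    (pvTtrip mapping (PySem.List.enumerate parts)).map (fun t => t.2.2)
      = (PySem.List.enumerate parts).flatMap
          (fun jp => pvTG mapping (PySem.List.enumerate parts) jp.1) := by
  unfold pvTtrip pvTG
  rw [List.map_flatMap]
  apply List.flatMap_congr
  intro jp _
  rw [List.map_filterMap]
  conv_rhs => rw [← PySem.List.map_snd_enumerate mapping 0, List.filterMap_map]
  apply List.filterMap_congr
  intro ikv _
  by_cases h : pvFirstMatch ikv.2.1 (PySem.List.enumerate parts) = some jp.1
  · simp [h]
  · simp [h]

-- ===== VERDICT (by name: the statement is the Claim_ definition above) =====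
theorem classify_comma_list_py_spec : Claim_equal_classify_comma_list_py := by
  intro raw mapping _
  unfold Spec_classify_comma_list_py classify_comma_list_py classify_comma_list_py_alt
  cases raw with
  | none => rfl
  | some s =>
    by_cases hs : s = ""
    · simp [hs]
    · simp only [hs, ite_false]
      have hA : (((PySem.Str.split? (PySem.Str.lower s) ",").getD []).foldl
          (fun out part0 =>
            let part := PySem.Str.strip part0
            mapping.foldl
              (fun out kv =>
                if PySem.Str.isIn kv.1 part && !(out.contains kv.2) then out ++ [kv.2] else out)
              out)
          [])
          = PySem.Set.update []
              ((((PySem.Str.split? (PySem.Str.lower s) ",").getD []).map PySem.Str.strip).flatMap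
                (pvG mapping)) := by
        rw [← foldl_update_eq_update_flatMap, List.foldl_map]
        congr 1
        funext out part0
        exact inner_loop_eq_update mapping (PySem.Str.strip part0) out
      rw [hA]
      set parts := ((PySem.Str.split? (PySem.Str.lower s) ",").getD []).map PySem.Str.strip with hparts
      have hflat : parts.flatMap (pvG mapping)
          = (PySem.List.enumerate parts).flatMap (fun jp => pvG mapping jp.2) := by
        conv_lhs => rw [← PySem.List.map_snd_enumerate parts 0]
        rw [List.flatMap_map]
      have hmain := main_update mapping parts parts [] []
        (by simp)
        (by
          intro kv _ j hf hj
          have := pvFirstMatch_bounds kv.1 parts 0 j hf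
          simp at hj
          omega)
      simp only [List.length_nil, Nat.cast_zero] at hmain
      have hB : ((PySem.List.enumerate mapping).foldl
          (fun acc ikv =>
            match pvFirstMatch ikv.2.1 (PySem.List.enumerate parts) with
            | some j => acc ++ [(j, ikv.1, ikv.2.2)]
            | none => acc) [])
          = (PySem.List.enumerate mapping).filterMap
              (fun ikv => (pvFirstMatch ikv.2.1 (PySem.List.enumerate parts)).map
                (fun j => (j, ikv.1, ikv.2.2))) := by
        rw [foldl_match_append (PySem.List.enumerate mapping)
          (fun ikv => pvFirstMatch ikv.2.1 (PySem.List.enumerate parts))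
          (fun ikv j => (j, ikv.1, ikv.2.2)) []]
        rfl
      rw [hflat, hB, sorted_hits_eq_ttrip, PySem.List.dedup_eq_ofList, ttrip_vals,
        ← PySem.Set.update_nil_left]
      exact hmain
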